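-- pv_equiv track=rewrite | github.com/cryocube/powers | main.py | sanitize_ptname
-- ===== SOURCE A (Python) =====
-- def sanitize_ptname(raw_string):
--     string = str()
--     slist = list()
--     for c in raw_string:
--         if ord(c) == 39 or ord(c) == 95 or ord(c) == 32 or ord(c) == 44 or 48<=ord(c)<=57 or 65<=ord(c)<=90 or 97<=ord(c)<=122:
--             string += c
--         else:
--             string += ''
--     return string
-- ===== SOURCE B (Python) =====
-- import re
--
-- _DISALLOWED = re.compile(r"[^A-Za-z0-9_', ]")
--
-- def sanitize_ptname(raw_string):
--     return _DISALLOWED.sub("", raw_string)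
-- ===== Notes on version B (the rewrite author's own statement) =====
-- stated objective: idiomatic
-- what changed: Replaced the explicit per-character loop with string concatenation by a single regex substitution deleting every character outside the allowed class [A-Za-z0-9_', ].
import Mathlib
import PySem

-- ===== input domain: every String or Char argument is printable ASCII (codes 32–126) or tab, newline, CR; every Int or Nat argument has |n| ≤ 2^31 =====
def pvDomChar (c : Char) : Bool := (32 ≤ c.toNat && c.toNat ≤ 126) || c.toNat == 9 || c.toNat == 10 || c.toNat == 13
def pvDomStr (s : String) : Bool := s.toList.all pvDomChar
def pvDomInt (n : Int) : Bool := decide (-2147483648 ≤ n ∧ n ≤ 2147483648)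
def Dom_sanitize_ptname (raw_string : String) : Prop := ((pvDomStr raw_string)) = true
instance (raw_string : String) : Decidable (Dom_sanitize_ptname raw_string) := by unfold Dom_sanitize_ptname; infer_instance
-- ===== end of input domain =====

-- B replaces A's per-character accumulation loop by one regex substitution deleting
-- every character outside the class [A-Za-z0-9_', ] (idiomatic; same result).

-- ===== PORT A =====
-- literal port: loop over the characters, appending the kept character (or '') to the accumulator
def sanitize_ptname (raw_string : String) : String :=
  raw_string.toList.foldl
    (fun string c =>
      if c.toNat == 39 || c.toNat == 95 || c.toNat == 32 || c.toNat == 44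
         || (decide (48 ≤ c.toNat) && decide (c.toNat ≤ 57))
         || (decide (65 ≤ c.toNat) && decide (c.toNat ≤ 90))
         || (decide (97 ≤ c.toNat) && decide (c.toNat ≤ 122))
      then string ++ String.singleton c
      else string ++ "")
    ""

-- ===== PORT B =====
-- port of the regex class [^A-Za-z0-9_', ]: a character matches it iff it is outside the class
def pvDisallowed (c : Char) : Bool :=
  !((decide (65 ≤ c.toNat) && decide (c.toNat ≤ 90))
    || (decide (97 ≤ c.toNat) && decide (c.toNat ≤ 122))
    || (decide (48 ≤ c.toNat) && decide (c.toNat ≤ 57))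
    || c.toNat == 95 || c.toNat == 39 || c.toNat == 44 || c.toNat == 32)

-- re.sub deletes every matching character: keep exactly the non-matching ones
def sanitize_ptname_alt (raw_string : String) : String :=
  String.ofList (raw_string.toList.filter (fun c => !pvDisallowed c))

-- ===== PRECONDITION & SPEC =====
def Spec_sanitize_ptname (raw_string : String) (out : String) : Prop := out = sanitize_ptname_alt raw_string
instance (raw_string : String) (out : String) : Decidable (Spec_sanitize_ptname raw_string out) := by unfold Spec_sanitize_ptname; infer_instance

-- ===== CLAIM (what is proved, stated in full; the proofs are below) =====
def Claim_equal_sanitize_ptname : Prop := ∀ (raw_string : String), Dom_sanitize_ptname raw_string → Spec_sanitize_ptname raw_string (sanitize_ptname raw_string)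

-- ===== LEMMAS AND PROOFS =====

lemma pv_pred_eq (c : Char) :
    (c.toNat == 39 || c.toNat == 95 || c.toNat == 32 || c.toNat == 44
      || (decide (48 ≤ c.toNat) && decide (c.toNat ≤ 57))
      || (decide (65 ≤ c.toNat) && decide (c.toNat ≤ 90))
      || (decide (97 ≤ c.toNat) && decide (c.toNat ≤ 122))) = !pvDisallowed c := by
  rw [Bool.eq_iff_iff]
  simp [pvDisallowed]
  omega

lemma pv_fold_toList (l : List Char) (acc : String) :
    (l.foldl
      (fun string c =>
        if c.toNat == 39 || c.toNat == 95 || c.toNat == 32 || c.toNat == 44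
           || (decide (48 ≤ c.toNat) && decide (c.toNat ≤ 57))
           || (decide (65 ≤ c.toNat) && decide (c.toNat ≤ 90))
           || (decide (97 ≤ c.toNat) && decide (c.toNat ≤ 122))
        then string ++ String.singleton c
        else string ++ "")
      acc).toList
    = acc.toList ++ l.filter (fun c => !pvDisallowed c) := by
  induction l generalizing acc with
  | nil => simp
  | cons c l ih =>
    rw [List.foldl_cons, pv_pred_eq c]
    by_cases h : pvDisallowed c = true
    · rw [h]
      simp only [Bool.not_true, Bool.false_eq_true, if_false]
      rw [ih (acc ++ ""), List.filter_cons]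
      simp [h]
    · have hb : pvDisallowed c = false := by simpa using h
      rw [hb]
      simp only [Bool.not_false, if_true]
      rw [ih (acc ++ String.singleton c), List.filter_cons]
      simp [hb, String.singleton]

-- ===== VERDICT (by name: the statement is the Claim_ definition above) =====
theorem sanitize_ptname_spec : Claim_equal_sanitize_ptname := by
  intro s _
  show sanitize_ptname s = sanitize_ptname_alt s
  have h := pv_fold_toList s.toList ""
  have : (sanitize_ptname s).toList = (sanitize_ptname_alt s).toList := by
    simpa [sanitize_ptname, sanitize_ptname_alt] using h
  calc sanitize_ptname s = String.ofList (sanitize_ptname s).toList := by simp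
    _ = String.ofList (sanitize_ptname_alt s).toList := by rw [this]
    _ = sanitize_ptname_alt s := by simp
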